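-- pv_equiv track=rewrite | github.com/caden4314/BetterClockSystem | client/client.py | inject_server_arg
-- ===== SOURCE A (Python) =====
-- def inject_server_arg(runtime_args: list[str], state_url: str) -> list[str]:
--     has_server = False
--     for idx, token in enumerate(runtime_args):
--         if token == "--server":
--             has_server = True
--             break
--         if token.startswith("--server="):
--             has_server = True
--             break
--         if token == "--":
--             break
--         if idx + 1 < len(runtime_args) and token == "--server":
--             has_server = True
--             break
--     if has_server:
--         return runtime_args
--     return ["--server", state_url, *runtime_args]
-- ===== SOURCE B (Python) =====
-- def inject_server_arg(runtime_args: list[str], state_url: str) -> list[str]: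
--     # Backward scan: a '--' cancels any server flag seen to its right, so the
--     # final flag says whether a --server token occurs before the first '--'.
--     has_server = False
--     for token in reversed(runtime_args):
--         if token == "--":
--             has_server = False
--         elif token == "--server" or token.startswith("--server="):
--             has_server = True
--     if has_server:
--         return runtime_args
--     return ["--server", state_url, *runtime_args]
-- ===== Notes on version B (the rewrite author's own statement) =====
-- stated objective: alternative
-- what changed: Replaces A's forward early-exit loop by a backward traversal over reversed(runtime_args) with no early exit: a '--' token resets the flag, cancelling any '--server'/'--server=' seen to its right, so the final flag equals 'server flag occurs before the first --'.
import Mathlib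
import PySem

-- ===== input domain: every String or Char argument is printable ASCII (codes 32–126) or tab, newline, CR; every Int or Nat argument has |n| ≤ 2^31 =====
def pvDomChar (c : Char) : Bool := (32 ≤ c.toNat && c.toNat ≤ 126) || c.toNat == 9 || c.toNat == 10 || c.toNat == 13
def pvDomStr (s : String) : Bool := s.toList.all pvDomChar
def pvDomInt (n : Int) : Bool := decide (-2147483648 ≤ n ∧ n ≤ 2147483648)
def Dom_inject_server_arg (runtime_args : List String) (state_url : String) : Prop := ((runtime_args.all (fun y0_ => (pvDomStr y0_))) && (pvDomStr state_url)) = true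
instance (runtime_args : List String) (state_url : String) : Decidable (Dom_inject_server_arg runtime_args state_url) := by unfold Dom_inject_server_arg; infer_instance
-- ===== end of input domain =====

-- B replaces A's forward early-exit loop by a backward reset-scan over the reversed list (objective: alternative).

-- ===== PORT A =====
-- A's for-loop over enumerate(runtime_args): idx is the enumerate counter, n = len(runtime_args);
-- has_server is the early-exit Boolean (break ⇒ return the value decided so far).
def injectLoopA (n : Nat) : List String → Nat → Bool
  | [], _ => false
  | token :: rest, idx =>
    if token == "--server" then true
    else if PySem.Str.startswith token "--server=" then true
    else if token == "--" then false
    else if idx + 1 < n && token == "--server" then true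
    else injectLoopA n rest (idx + 1)

def inject_server_arg (runtime_args : List String) (state_url : String) : List String :=
  let has_server := injectLoopA runtime_args.length runtime_args 0
  if has_server then runtime_args
  else "--server" :: state_url :: runtime_args

-- ===== PORT B =====
-- for token in reversed(runtime_args): '--' resets the flag, a server token sets it.
def inject_server_arg_alt (runtime_args : List String) (state_url : String) : List String :=
  let has_server := runtime_args.reverse.foldl
    (fun has_server token =>
      if token == "--" then false
      else if token == "--server" || PySem.Str.startswith token "--server=" then true
      else has_server) false
  if has_server then runtime_args
  else "--server" :: state_url :: runtime_args

-- ===== PRECONDITION & SPEC =====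
def Spec_inject_server_arg (runtime_args : List String) (state_url : String) (out : List String) : Prop := out = inject_server_arg_alt runtime_args state_url
instance (runtime_args : List String) (state_url : String) (out : List String) : Decidable (Spec_inject_server_arg runtime_args state_url out) := by unfold Spec_inject_server_arg; infer_instance

-- ===== CLAIM (what is proved, stated in full; the proofs are below) =====
def Claim_equal_inject_server_arg : Prop := ∀ (runtime_args : List String) (state_url : String), Dom_inject_server_arg runtime_args state_url → Spec_inject_server_arg runtime_args state_url (inject_server_arg runtime_args state_url)

-- ===== LEMMAS AND PROOFS =====

-- B's backward scan, rewritten as a foldr over the original list.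
lemma foldl_reverse_eq_foldr (l : List String) :
    l.reverse.foldl
      (fun has_server token =>
        if token == "--" then false
        else if token == "--server" || PySem.Str.startswith token "--server=" then true
        else has_server) false
    = l.foldr
      (fun token acc =>
        if token == "--" then false
        else if token == "--server" || PySem.Str.startswith token "--server=" then true
        else acc) false := by
  rw [List.foldl_reverse]

-- A's early-exit loop computes the same Boolean as the foldr, for any n and idx.
lemma injectLoopA_eq_foldr (l : List String) : ∀ (n idx : Nat),
    injectLoopA n l idx
    = l.foldr
        (fun token acc =>
          if token == "--" then false
          else if token == "--server" || PySem.Str.startswith token "--server=" then true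
          else acc) false := by
  induction l with
  | nil => intro n idx; simp [injectLoopA]
  | cons t rest ih =>
    intro n idx
    by_cases h1 : t = "--server"
    · subst h1; simp [injectLoopA]
    · by_cases h2 : PySem.Chars.startswith t.toList ['-', '-', 's', 'e', 'r', 'v', 'e', 'r', '='] = true
      · have hne : t ≠ "--" := by
          intro h; subst h; exact absurd h2 (by decide)
        simp [injectLoopA, h1, h2, PySem.Str.startswith, hne]
      · by_cases h3 : t = "--"
        · subst h3; simp [injectLoopA]; decide
        · simp [injectLoopA, h1, h2, h3, PySem.Str.startswith, ih]

-- ===== VERDICT (by name: the statement is the Claim_ definition above) =====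
theorem inject_server_arg_spec : Claim_equal_inject_server_arg := by
  intro runtime_args state_url _
  unfold Spec_inject_server_arg inject_server_arg inject_server_arg_alt
  rw [foldl_reverse_eq_foldr, injectLoopA_eq_foldr]
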